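-- pv_equiv track=rewrite | github.com/ATofighi/homeworks | 972-Cryptography/Homeworks/1/helper.py | make_text_blocks
-- ===== SOURCE A (Python) =====
-- def make_text_blocks(my_blocks):
--     text_blocks = []
--     for j in range(max([len(my_blocks[i]) for i in range(len(my_blocks))])):
--         block_text = ''
--         for i in range(len(my_blocks)):
--             if j < len(my_blocks[i]):
--                 block_text += my_blocks[i][j]
--         text_blocks.append(block_text)
--     return text_blocks
-- ===== SOURCE B (Python) =====
-- def make_text_blocks(my_blocks):
--     width = max(len(b) for b in my_blocks)
--     result = [''] * width
--     for b in my_blocks: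
--         for k in range(len(b)):
--             result[k] += b[k]
--     return result
-- ===== Notes on version B (the rewrite author's own statement) =====
-- stated objective: alternative
-- what changed: A gathers each output column with nested index loops (column-outer, guarded j < len lookup per block); B preallocates width empty strings and scatters block-outer, appending b[k] to result[k] for only the existing cells of each block, with no conditional and no index-based block lookup.
import Mathlib
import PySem

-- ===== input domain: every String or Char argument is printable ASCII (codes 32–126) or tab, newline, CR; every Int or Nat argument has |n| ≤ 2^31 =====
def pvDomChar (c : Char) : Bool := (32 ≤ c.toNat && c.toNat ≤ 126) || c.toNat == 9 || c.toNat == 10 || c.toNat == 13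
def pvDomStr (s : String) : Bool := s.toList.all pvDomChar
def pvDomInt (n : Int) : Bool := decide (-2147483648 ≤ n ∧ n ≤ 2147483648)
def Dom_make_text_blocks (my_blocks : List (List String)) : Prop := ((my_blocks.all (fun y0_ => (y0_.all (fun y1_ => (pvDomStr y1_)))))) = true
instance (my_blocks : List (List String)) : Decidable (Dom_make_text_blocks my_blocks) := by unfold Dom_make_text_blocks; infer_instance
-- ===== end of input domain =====

-- B replaces A's column-outer gather (nested index loops with a j < len guard) by a
-- block-outer scatter into a preallocated list of width empty strings (objective: alternative).

-- ===== PORT A =====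
-- column-outer gather: for each j in range(max of lengths), concatenate my_blocks[i][j] over all i with j < len
def make_text_blocks (my_blocks : List (List String)) : List String :=
  match PySem.List.max?
      ((PySem.List.pyRange 0 (PySem.List.len my_blocks) 1).map
        (fun i => PySem.List.len (PySem.List.pyGetD my_blocks i []))) (fun x => x) with
  | none => []   -- Python: max([]) raises ValueError; excluded by Pre_
  | some w =>
    (PySem.List.pyRange 0 w 1).foldl
      (fun text_blocks j =>
        text_blocks ++
          [(PySem.List.pyRange 0 (PySem.List.len my_blocks) 1).foldl
            (fun block_text i =>
              if j < PySem.List.len (PySem.List.pyGetD my_blocks i []) then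
                block_text ++ PySem.List.pyGetD (PySem.List.pyGetD my_blocks i []) j ""
              else block_text)
            ""])
      []

-- ===== PORT B =====
-- block-outer scatter: result = [''] * width; for b in my_blocks: for k in range(len(b)): result[k] += b[k]
def make_text_blocks_alt (my_blocks : List (List String)) : List String :=
  match PySem.List.max? (my_blocks.map (fun b => PySem.List.len b)) (fun x => x) with
  | none => []   -- Python: max() of an empty generator raises ValueError; excluded by Pre_
  | some w =>
    my_blocks.foldl
      (fun result b =>
        (PySem.List.pyRange 0 (PySem.List.len b) 1).foldl
          (fun r k => PySem.List.pySetD r k (PySem.List.pyGetD r k "" ++ PySem.List.pyGetD b k ""))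
          result)
      (List.replicate w.toNat "")

-- ===== PRECONDITION & SPEC =====
-- Pre_ excludes exactly the empty list, on which both Pythons raise ValueError (max of an empty sequence).
def Pre_make_text_blocks (my_blocks : List (List String)) : Prop := my_blocks ≠ []
instance (my_blocks : List (List String)) : Decidable (Pre_make_text_blocks my_blocks) := by
  unfold Pre_make_text_blocks; infer_instance
def pvWitness_make_text_blocks : List (List String) := [["ab", "c"], ["d"]]

def Spec_make_text_blocks (my_blocks : List (List String)) (out : List String) : Prop := out = make_text_blocks_alt my_blocks
instance (my_blocks : List (List String)) (out : List String) : Decidable (Spec_make_text_blocks my_blocks out) := by unfold Spec_make_text_blocks; infer_instance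

-- ===== CLAIM (what is proved, stated in full; the proofs are below) =====
def Claim_equal_make_text_blocks : Prop := ∀ (my_blocks : List (List String)), Dom_make_text_blocks my_blocks → Pre_make_text_blocks my_blocks → Spec_make_text_blocks my_blocks (make_text_blocks my_blocks)

-- ===== LEMMAS AND PROOFS =====

-- the column string gathered for index k (shared description of both inner computations)
def pvCol (my_blocks : List (List String)) (k : Nat) : String :=
  my_blocks.foldl (fun s b => if k < b.length then s ++ b.getD k "" else s) ""

-- B's inner scatter loop over one block, in Nat form
def pvScat (b : List String) (m : Nat) (res : List String) : List String :=
  (List.range m).foldl (fun r k => r.set k (r.getD k "" ++ b.getD k "")) res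

theorem pvScat_succ (b : List String) (m : Nat) (res : List String) :
    pvScat b (m + 1) res =
      (pvScat b m res).set m ((pvScat b m res).getD m "" ++ b.getD m "") := by
  simp [pvScat, List.range_succ]

theorem pvScat_length (b : List String) (m : Nat) (res : List String) :
    (pvScat b m res).length = res.length := by
  induction m with
  | zero => rfl
  | succ m ih => rw [pvScat_succ, List.length_set, ih]

theorem pv_getD_set (l : List String) (i k : Nat) (v : String) :
    (l.set i v).getD k "" = if k = i ∧ i < l.length then v else l.getD k "" := by
  simp only [List.getD, List.getElem?_set]
  split_ifs with h1 h2 h3 h4 <;> simp_all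

theorem pvScat_getD (b : List String) (m : Nat) (res : List String) (hm : m ≤ res.length)
    (k : Nat) :
    (pvScat b m res).getD k "" =
      if k < m then res.getD k "" ++ b.getD k "" else res.getD k "" := by
  induction m with
  | zero => simp [pvScat]
  | succ m ih =>
    have hm' : m ≤ res.length := Nat.le_of_succ_le hm
    rw [pvScat_succ, pv_getD_set]
    simp only [pvScat_length]
    by_cases hk : k = m
    · subst hk
      have hklt : k < res.length := hm
      rw [if_pos ⟨rfl, hklt⟩, if_pos (Nat.lt_succ_self k)]
      rw [ih hm', if_neg (Nat.lt_irrefl k)]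
    · rw [if_neg (by tauto), ih hm']
      by_cases hkm : k < m
      · rw [if_pos hkm, if_pos (by omega)]
      · rw [if_neg hkm, if_neg (by omega)]

-- B's inner loop over one block is pvScat
theorem pvInner_eq_pvScat (b res : List String) :
    (PySem.List.pyRange 0 (PySem.List.len b) 1).foldl
      (fun r k => PySem.List.pySetD r k (PySem.List.pyGetD r k "" ++ PySem.List.pyGetD b k ""))
      res = pvScat b b.length res := by
  simp only [PySem.List.len, PySem.List.pyRange_one, Int.sub_zero, Int.toNat_natCast,
    List.foldl_map, pvScat]
  apply PySem.List.foldl_congr_mem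
  intro r k _hk
  simp [PySem.List.pySetD_natCast, PySem.List.pyGetD_natCast]

-- scatter invariant over the list of blocks
theorem pvFold_invariant (bs : List (List String)) (n : Nat)
    (hle : ∀ b ∈ bs, b.length ≤ n) (res : List String) (hres : res.length = n) :
    (bs.foldl (fun result b => pvScat b b.length result) res).length = n ∧
    ∀ k, (bs.foldl (fun result b => pvScat b b.length result) res).getD k "" =
      bs.foldl (fun s b => if k < b.length then s ++ b.getD k "" else s) (res.getD k "") := by
  induction bs generalizing res with
  | nil => exact ⟨hres, fun k => rfl⟩
  | cons b bs ih =>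
    have hb : b.length ≤ n := hle b (by simp)
    have h1 : (pvScat b b.length res).length = n := by rw [pvScat_length, hres]
    obtain ⟨hl, hg⟩ := ih (fun x hx => hle x (by simp [hx])) (pvScat b b.length res) h1
    refine ⟨hl, fun k => ?_⟩
    simp only [List.foldl_cons]
    rw [hg k, pvScat_getD b b.length res (by omega) k]

-- A's loop body is the map of columns
theorem pvA_eq_map (bs : List (List String)) (w : Int) :
    (PySem.List.pyRange 0 w 1).foldl
      (fun text_blocks j =>
        text_blocks ++
          [(PySem.List.pyRange 0 (PySem.List.len bs) 1).foldl
            (fun block_text i =>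
              if j < PySem.List.len (PySem.List.pyGetD bs i []) then
                block_text ++ PySem.List.pyGetD (PySem.List.pyGetD bs i []) j ""
              else block_text)
            ""])
      [] = (List.range w.toNat).map (fun k => pvCol bs k) := by
  rw [PySem.List.foldl_append_singleton_eq_map, PySem.List.pyRange_one 0 w]
  simp only [Int.sub_zero, List.map_map, List.nil_append]
  apply List.map_congr_left
  intro k _hk
  simp only [Function.comp_apply, Int.zero_add]
  rw [PySem.List.foldl_pyRange_zero_pyGetD bs ([] : List String)
    (fun block_text b =>
      if (k : Int) < PySem.List.len b then block_text ++ PySem.List.pyGetD b (k : Int) ""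
      else block_text) ""]
  apply PySem.List.foldl_congr_mem
  intro s b _hb
  simp only [PySem.List.len, PySem.List.pyGetD_natCast, Nat.cast_lt]

-- the two width computations are the same maximum
theorem pvWidth_eq (bs : List (List String)) :
    PySem.List.max?
      ((PySem.List.pyRange 0 (PySem.List.len bs) 1).map
        (fun i => PySem.List.len (PySem.List.pyGetD bs i []))) (fun x => x) =
    PySem.List.max? (bs.map (fun b => PySem.List.len b)) (fun x => x) := by
  congr 1
  rw [show (fun i => PySem.List.len (PySem.List.pyGetD bs i ([] : List String))) =
      (fun b => PySem.List.len b) ∘ (fun i => PySem.List.pyGetD bs i ([] : List String)) from rfl,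
    ← List.map_map, PySem.List.map_pyGetD_pyRange_zero]

-- ===== VERDICT (by name: the statement is the Claim_ definition above) =====
theorem make_text_blocks_spec : Claim_equal_make_text_blocks := by
  intro bs _hdom hpre
  unfold Spec_make_text_blocks make_text_blocks make_text_blocks_alt
  rw [pvWidth_eq]
  cases hmax : PySem.List.max? (bs.map (fun b => PySem.List.len b)) (fun x => x) with
  | none => rfl
  | some w =>
    dsimp only
    rw [pvA_eq_map]
    have hw : ∀ b ∈ bs, b.length ≤ w.toNat := by
      intro b hb
      have := PySem.List.max?_isMax hmax (PySem.List.len b) (List.mem_map_of_mem hb)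
      simp only [PySem.List.len] at this
      omega
    have hfold :
        bs.foldl (fun result b =>
          (PySem.List.pyRange 0 (PySem.List.len b) 1).foldl
            (fun r k => PySem.List.pySetD r k (PySem.List.pyGetD r k "" ++ PySem.List.pyGetD b k ""))
            result) (List.replicate w.toNat "") =
        bs.foldl (fun result b => pvScat b b.length result) (List.replicate w.toNat "") := by
      apply PySem.List.foldl_congr_mem
      intro r b _hb
      exact pvInner_eq_pvScat b r
    rw [hfold]
    obtain ⟨hlen, hget⟩ := pvFold_invariant bs w.toNat hw (List.replicate w.toNat "")
      (by simp)
    apply List.ext_getElem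
    · simp [hlen]
    · intro k hk1 hk2
      have hk : k < w.toNat := by simpa using hk1
      have h2 := hget k
      have hrep : (List.replicate w.toNat ("" : String)).getD k "" = "" := by
        simp [List.getD, hk]
      rw [hrep] at h2
      have h3 : (bs.foldl (fun result b => pvScat b b.length result)
          (List.replicate w.toNat "")).getD k "" =
          (bs.foldl (fun result b => pvScat b b.length result) (List.replicate w.toNat ""))[k] := by
        rw [List.getD, List.getElem?_eq_getElem hk2, Option.getD_some]
      simp only [List.getElem_map, List.getElem_range]
      rw [← h3, h2]
      rfl
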